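-- pv_equiv track=rewrite | github.com/percywk/past-projects | cram_rewrite.py | select_from_pool
-- ===== SOURCE A (Python) =====
-- def select_from_pool(starting_placements, remaining_pool):
-- 	all_placements = []
-- 	all_placements.append(starting_placements)
-- 	new_placements = []
--
-- 	for key, values in remaining_pool.items():
-- 		for placement in values:
-- 			for item in all_placements:
-- 				list_variable = []
-- 				for sub_item in item:
-- 					list_variable.append(sub_item)
--
-- 				list_variable.append(placement)
-- 				new_placements.append(list_variable)
--
-- 		all_placements = new_placements
-- 		new_placements = []
--
-- 	return all_placements
-- ===== SOURCE B (Python) =====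
-- def select_from_pool(starting_placements, remaining_pool):
--     # Mixed-radix index decoding: there are prod(len(vs)) placements; placement
--     # number i picks values_j[d_j] where the d_j are the digits of i in the mixed
--     # radix of the list lengths, least-significant digit = first key (so the first
--     # key varies fastest, matching A's enumeration order). No intermediate buffers.
--     value_lists = list(remaining_pool.values())
--     total = 1
--     for vs in value_lists:
--         total *= len(vs)
--     result = []
--     for i in range(total):
--         row = list(starting_placements)
--         for vs in value_lists:
--             i, d = divmod(i, len(vs))
--             row.append(vs[d])
--         result.append(row)
--     return result
-- ===== Notes on version B (the rewrite author's own statement) =====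
-- stated objective: alternative
-- what changed: A grows the placement list key by key with nested loops over a double buffer (copying each placement element by element); B never builds intermediate buffers: it computes the total count as the product of the value-list lengths and decodes each index i in range(total) into mixed-radix digits with divmod, picking values[digit] for each key directly.
import Mathlib
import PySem

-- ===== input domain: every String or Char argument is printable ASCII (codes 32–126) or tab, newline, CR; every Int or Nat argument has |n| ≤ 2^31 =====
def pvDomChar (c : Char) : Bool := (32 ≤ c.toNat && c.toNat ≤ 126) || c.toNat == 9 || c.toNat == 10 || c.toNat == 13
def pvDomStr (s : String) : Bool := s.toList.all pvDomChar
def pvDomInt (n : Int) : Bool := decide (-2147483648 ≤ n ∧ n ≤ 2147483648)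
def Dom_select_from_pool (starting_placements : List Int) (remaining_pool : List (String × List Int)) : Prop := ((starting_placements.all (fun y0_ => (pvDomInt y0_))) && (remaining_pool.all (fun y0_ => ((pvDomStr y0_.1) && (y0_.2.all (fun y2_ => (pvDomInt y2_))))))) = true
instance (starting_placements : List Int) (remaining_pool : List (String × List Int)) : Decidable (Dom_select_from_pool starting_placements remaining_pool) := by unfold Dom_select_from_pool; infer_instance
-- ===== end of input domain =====

-- B replaces A's per-key buffer-growing nested loops by counting: it computes the
-- total number of placements and decodes each index into its mixed-radix digits,
-- one digit per key, picking values[digit] directly (alternative algorithm).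

-- ===== PORT A =====
-- A: for each key's values, for each value, for each existing placement, copy it
-- element by element, append the value; the new buffer replaces the old list.
def select_from_pool (starting_placements : List Int) (remaining_pool : List (String × List Int)) : List (List Int) :=
  remaining_pool.foldl
    (fun all_placements kv =>
      kv.2.foldl
        (fun new_placements placement =>
          new_placements ++ all_placements.map
            (fun item => (item.foldl (fun list_variable sub_item => list_variable ++ [sub_item]) []) ++ [placement]))
        [])
    [starting_placements]

-- ===== PORT B =====
-- B: total = product of the value-list lengths; for i in range(total), decode i
-- digit by digit with divmod and append vs[d] to a copy of starting_placements.
-- (divmod ported as floordiv/mod; vs[d] via pyGet?, always in range since d < len(vs).)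
def select_from_pool_alt (starting_placements : List Int) (remaining_pool : List (String × List Int)) : List (List Int) :=
  let value_lists := remaining_pool.map Prod.snd
  let total := value_lists.foldl (fun t vs => t * (vs.length : Int)) 1
  (PySem.List.pyRange 0 total 1).foldl
    (fun result i =>
      let st := value_lists.foldl
        (fun (st : Int × List Int) vs =>
          (PySem.Int.floordiv st.1 (vs.length : Int),
           st.2 ++ [(PySem.List.pyGet? vs (PySem.Int.mod st.1 (vs.length : Int))).getD 0]))
        (i, starting_placements)
      result ++ [st.2])
    []

-- ===== PRECONDITION & SPEC =====
def Spec_select_from_pool (starting_placements : List Int) (remaining_pool : List (String × List Int)) (out : List (List Int)) : Prop := out = select_from_pool_alt starting_placements remaining_pool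
instance (starting_placements : List Int) (remaining_pool : List (String × List Int)) (out : List (List Int)) : Decidable (Spec_select_from_pool starting_placements remaining_pool out) := by unfold Spec_select_from_pool; infer_instance

-- ===== CLAIM (what is proved, stated in full; the proofs are below) =====
def Claim_equal_select_from_pool : Prop := ∀ (starting_placements : List Int) (remaining_pool : List (String × List Int)), Dom_select_from_pool starting_placements remaining_pool → Spec_select_from_pool starting_placements remaining_pool (select_from_pool starting_placements remaining_pool)

-- ===== LEMMAS AND PROOFS =====

-- A's element-by-element copy of a list is the list itself.
theorem pv_copy_id (xs acc : List Int) :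
    xs.foldl (fun l s => l ++ [s]) acc = acc ++ xs := by
  induction xs generalizing acc with
  | nil => simp
  | cons x xs ih => simp [List.foldl, ih, List.append_assoc]

-- A's inner accumulation loop is a flatMap.
theorem pv_step_flatMap (g : Int → List (List Int)) (vs : List Int) (acc : List (List Int)) :
    vs.foldl (fun np v => np ++ g v) acc = acc ++ vs.flatMap g := by
  induction vs generalizing acc with
  | nil => simp
  | cons v vs ih => simp [List.foldl, ih, List.append_assoc]

-- A's left fold over the value-lists equals the right-fold Cartesian product
-- (combos stored reversed) distributed over the accumulator.
theorem pv_main (ls : List (List Int)) (acc : List (List Int)) :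
    ls.foldl (fun all vs => vs.flatMap (fun v => all.map (· ++ [v]))) acc
      = (ls.foldr (fun vs cs => cs.flatMap (fun c => vs.map (fun v => c ++ [v]))) [[]]).flatMap
          (fun c => acc.map (· ++ c.reverse)) := by
  induction ls generalizing acc with
  | nil => simp
  | cons vs rest ih =>
    simp only [List.foldl, List.foldr, ih]
    simp only [List.flatMap_map, List.map_flatMap, List.flatMap_assoc]
    simp [Function.comp_def, List.append_assoc]

-- The digits B's inner loop extracts, as a standalone recursion.
def pvDec (vls : List (List Int)) (i : Int) : List Int :=
  match vls with
  | [] => []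
  | vs :: rest =>
      (PySem.List.pyGet? vs (PySem.Int.mod i (vs.length : Int))).getD 0
        :: pvDec rest (PySem.Int.floordiv i (vs.length : Int))

-- B's inner fold appends exactly the decoded digits.
theorem pv_inner (vls : List (List Int)) (i : Int) (acc : List Int) :
    (vls.foldl
      (fun (st : Int × List Int) vs =>
        (PySem.Int.floordiv st.1 (vs.length : Int),
         st.2 ++ [(PySem.List.pyGet? vs (PySem.Int.mod st.1 (vs.length : Int))).getD 0]))
      (i, acc)).2 = acc ++ pvDec vls i := by
  induction vls generalizing i acc with
  | nil => simp [pvDec]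
  | cons vs rest ih => simp [List.foldl, ih, pvDec, List.append_assoc]

-- B's total is the product of the lengths.
theorem pv_total (vls : List (List Int)) (t : Int) :
    vls.foldl (fun t vs => t * (vs.length : Int)) t = t * (((vls.map List.length).prod : Nat) : Int) := by
  induction vls generalizing t with
  | nil => simp
  | cons vs rest ih =>
    simp only [List.foldl, List.map_cons, List.prod_cons, ih]
    push_cast; ring

-- Indexing a list by every r < length is the list itself (under any cons-shaped map).
theorem pv_map_range_getD (vs : List Int) (K : Int → List Int) :
    (List.range vs.length).map (fun r => K (vs.getD r 0)) = vs.map K := by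
  induction vs with
  | nil => simp
  | cons x vs ih =>
    rw [List.length_cons, List.range_succ_eq_map, List.map_cons, List.map_map]
    simp only [Function.comp_def, List.getD_cons_zero, List.getD_cons_succ]
    rw [ih, List.map_cons]

-- range (T*l) split into T blocks of l consecutive indices.
theorem pv_range_mul (T l : Nat) :
    List.range (T * l) = (List.range T).flatMap (fun q => (List.range l).map (fun r => q * l + r)) := by
  induction T with
  | zero => simp
  | succ T ih =>
    rw [Nat.succ_mul, List.range_add, ih, List.range_succ, List.flatMap_append]
    simp [Nat.add_comm]

-- Main correspondence: decoding every index in range(total) yields the reversed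
-- combinations of the right-fold Cartesian product, in the same order.
theorem pv_decode (vls : List (List Int)) :
    (List.range ((vls.map List.length).prod)).map (fun k : Nat => pvDec vls (k : Int))
      = (vls.foldr (fun vs cs => cs.flatMap (fun c => vs.map (fun v => c ++ [v]))) [[]]).map
          List.reverse := by
  induction vls with
  | nil => simp [pvDec]
  | cons vs rest ih =>
    by_cases hl : vs.length = 0
    · rw [List.eq_nil_iff_length_eq_zero.mpr hl] at *
      simp
    · have hl' : 0 < vs.length := Nat.pos_of_ne_zero hl
      have hblock : ∀ q : Nat,
          (List.range vs.length).map (fun r => pvDec (vs :: rest) ((q * vs.length + r : Nat) : Int))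
            = vs.map (fun x => x :: pvDec rest (q : Int)) := by
        intro q
        have h1 : ∀ r ∈ List.range vs.length,
            pvDec (vs :: rest) ((q * vs.length + r : Nat) : Int)
              = (fun y => y :: pvDec rest (q : Int)) (vs.getD r 0) := by
          intro r hr
          have hr' : r < vs.length := List.mem_range.mp hr
          show (PySem.List.pyGet? vs (PySem.Int.mod _ _)).getD 0 :: pvDec rest (PySem.Int.floordiv _ _) = _
          rw [PySem.Int.mod_natCast, PySem.Int.floordiv_natCast]
          have hm : (q * vs.length + r) % vs.length = r := by
            rw [Nat.mul_add_mod']; exact Nat.mod_eq_of_lt hr'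
          have hd : (q * vs.length + r) / vs.length = q := by
            rw [Nat.add_comm, Nat.add_mul_div_right _ _ hl', Nat.div_eq_of_lt hr', Nat.zero_add]
          rw [hm, hd, PySem.List.pyGet?_natCast]
          simp [List.getD, hr']
        rw [List.map_congr_left h1]
        exact pv_map_range_getD vs (fun y => y :: pvDec rest (q : Int))
      rw [List.map_cons, List.prod_cons, Nat.mul_comm, pv_range_mul, List.map_flatMap]
      simp only [List.map_map, Function.comp_def]
      rw [funext hblock]  -- apply the block identity under the flatMap
      rw [← List.flatMap_map (fun q : Nat => pvDec rest (q : Int))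
            (fun w => vs.map (fun x => x :: w)), ih, List.flatMap_map]
      simp only [List.foldr, List.map_flatMap, List.map_map, Function.comp_def]
      simp [List.reverse_append]

-- ===== VERDICT (by name: the statement is the Claim_ definition above) =====
theorem select_from_pool_spec : Claim_equal_select_from_pool := by
  intro sp pool _
  unfold Spec_select_from_pool select_from_pool select_from_pool_alt
  dsimp only
  -- A's side: copy-loop is identity, inner loop a flatMap, then pv_main with acc = [sp]
  have hA : pool.foldl
      (fun all_placements kv =>
        kv.2.foldl
          (fun new_placements placement =>
            new_placements ++ all_placements.map
              (fun item => (item.foldl (fun lv s => lv ++ [s]) []) ++ [placement]))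
          [])
      [sp]
      = (pool.map Prod.snd).foldl (fun all vs => vs.flatMap (fun v => all.map (· ++ [v]))) [sp] := by
    rw [List.foldl_map]
    congr 1
    funext all kv
    rw [pv_step_flatMap]
    simp only [pv_copy_id, List.nil_append]
  rw [hA, pv_main]
  -- B's side: total = prod, the outer append-loop is a map, the inner loop is pvDec
  rw [show ((pool.map Prod.snd).foldl (fun t vs => t * (vs.length : Int)) 1)
        = ((((pool.map Prod.snd).map List.length).prod : Nat) : Int) by
      rw [pv_total]; ring]
  rw [PySem.List.pyRange_zero_nat, PySem.List.foldl_append_singleton_eq_map]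
  simp only [pv_inner, List.nil_append, List.map_map, Function.comp_def]
  have hd := pv_decode (pool.map Prod.snd)
  simp only [List.map_map, Function.comp_def] at hd
  have h2 : (List.range ((pool.map (fun x => x.2.length)).prod)).map
      (fun k : Nat => sp ++ pvDec (pool.map Prod.snd) (k : Int))
      = ((List.range ((pool.map (fun x => x.2.length)).prod)).map
          (fun k : Nat => pvDec (pool.map Prod.snd) (k : Int))).map (fun w => sp ++ w) := by
    simp [List.map_map, Function.comp_def]
  rw [h2, hd]
  simp only [List.map_map, List.map_cons, List.map_nil, Function.comp_def]
  exact List.map_eq_flatMap.symm
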